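-- pv_equiv track=rewrite | github.com/jfgoodall/advent-of-code | 2024/py/day22.py | part2
-- ===== SOURCE A (Python) =====
-- from collections import defaultdict
--
-- def generate_secret(secret):
--     secret = ((secret << 6) ^ secret) & 0xFFFFFF
--     secret = ((secret >> 5) ^ secret) & 0xFFFFFF
--     secret = ((secret << 11) ^ secret) & 0xFFFFFF
--     return secret
--
-- def part2(secrets):
--     sequence_prices = defaultdict(int)
--     for secret in secrets:
--         seen = set()
--         sequence = tuple()
--         prev_price = secret % 10
--
--         for _ in range(2000):
--             secret = generate_secret(secret)
--             price = secret % 10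
--             sequence = sequence[-3:] + (price - prev_price,)
--
--             if len(sequence) == 4 and sequence not in seen:
--                 seen.add(sequence)
--                 sequence_prices[sequence] += price
--
--             prev_price = price
--
--     return max(sequence_prices.values())
-- ===== SOURCE B (Python) =====
-- from collections import defaultdict
--
-- def _next_secret(secret):
--     secret = ((secret << 6) ^ secret) & 0xFFFFFF
--     secret = ((secret >> 5) ^ secret) & 0xFFFFFF
--     secret = ((secret << 11) ^ secret) & 0xFFFFFF
--     return secret
--
-- def part2(secrets):
--     sequence_prices = defaultdict(int)
--     for secret in secrets:
--         # materialize the full price series, then its difference series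
--         prices = [secret % 10]
--         for _ in range(2000):
--             secret = _next_secret(secret)
--             prices.append(secret % 10)
--         diffs = [prices[i + 1] - prices[i] for i in range(2000)]
--         # credit each 4-change window at its first occurrence for this buyer
--         seen = set()
--         for i in range(len(diffs) - 3):
--             window = tuple(diffs[i:i + 4])
--             if window not in seen:
--                 seen.add(window)
--                 sequence_prices[window] += prices[i + 4]
--     return max(sequence_prices.values())
-- ===== Notes on version B (the rewrite author's own statement) =====
-- stated objective: alternative
-- what changed: A fuses secret generation, the rolling 4-change window, the seen-set test and the credit into one 2000-step loop carrying (secret, window tuple, prev_price); B first materializes the full price list and the difference list per buyer and then runs a separate index loop over the 1997 4-windows (diffs[i:i+4], crediting prices[i+4]).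
-- outside the precondition, e.g. on part2([]): A raises ValueError, B raises ValueError
import Mathlib
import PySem

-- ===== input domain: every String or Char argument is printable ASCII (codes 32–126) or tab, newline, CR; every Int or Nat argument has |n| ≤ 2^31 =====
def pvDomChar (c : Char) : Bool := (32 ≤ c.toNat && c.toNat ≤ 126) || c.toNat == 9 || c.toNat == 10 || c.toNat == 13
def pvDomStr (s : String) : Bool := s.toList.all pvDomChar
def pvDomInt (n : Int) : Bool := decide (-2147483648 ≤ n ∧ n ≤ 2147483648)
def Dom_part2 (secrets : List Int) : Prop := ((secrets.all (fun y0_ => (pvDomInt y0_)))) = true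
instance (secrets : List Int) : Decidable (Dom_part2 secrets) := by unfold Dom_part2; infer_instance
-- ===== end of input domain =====

-- B re-decomposes A's fused 2000-step sliding-window pass into materialized price/diff lists plus an
-- indexed loop over 4-windows (objective: alternative decomposition, same asymptotic cost).

-- ===== PORT A =====
-- generate_secret (the identical helper appears in both Python files; shared by both ports)
def pvGen (s : Int) : Int :=
  let s1 := PySem.Int.band (PySem.Int.bxor (s <<< 6) s) 0xFFFFFF
  let s2 := PySem.Int.band (PySem.Int.bxor (s1 >>> 5) s1) 0xFFFFFF
  PySem.Int.band (PySem.Int.bxor (s2 <<< 11) s2) 0xFFFFFF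

-- one iteration of A's inner `for _ in range(2000)` loop; the Python tuple `sequence`
-- (variable length 0..4) is modelled as a List Int
def pvStepA (st : Int × List Int × Int × PySem.Set (List Int) × PySem.Dict (List Int) Int) :
    Int × List Int × Int × PySem.Set (List Int) × PySem.Dict (List Int) Int :=
  match st with
  | (secret, seq, prevPrice, seen, d) =>
    let secret' := pvGen secret
    let price := PySem.Int.mod secret' 10
    let seq' := PySem.List.slice seq (some (-3)) none ++ [price - prevPrice]
    if seq'.length = 4 ∧ seq' ∉ seen then
      (secret', seq', price, PySem.Set.add seen seq', d.modify seq' 0 (· + price))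
    else
      (secret', seq', price, seen, d)

def part2 (secrets : List Int) : Int :=
  let d := secrets.foldl (fun d secret =>
    ((PySem.List.pyRange 0 2000 1).foldl (fun st _ => pvStepA st)
      (secret, ([] : List Int), PySem.Int.mod secret 10, PySem.Set.empty, d)).2.2.2.2) PySem.Dict.empty
  (PySem.List.max? d.values (fun v => v)).getD 0

-- ===== PORT B =====
def part2_alt (secrets : List Int) : Int :=
  let d := secrets.foldl (fun d secret =>
    -- materialize the full price series
    let ps := (PySem.List.pyRange 0 2000 1).foldl
        (fun (st : Int × List Int) _ =>
          let s' := pvGen st.1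
          (s', st.2 ++ [PySem.Int.mod s' 10]))
        (secret, [PySem.Int.mod secret 10])
    let prices := ps.2
    -- difference series
    let diffs := (PySem.List.pyRange 0 2000 1).map
        (fun i => PySem.List.pyGetD prices (i + 1) 0 - PySem.List.pyGetD prices i 0)
    -- credit each 4-window at its first occurrence for this buyer
    let res := (PySem.List.pyRange 0 (PySem.List.len diffs - 3) 1).foldl
        (fun (st : PySem.Set (List Int) × PySem.Dict (List Int) Int) i =>
          let window := PySem.List.slice diffs (some i) (some (i + 4))
          if window ∉ st.1 then
            (PySem.Set.add st.1 window,
             st.2.modify window 0 (· + PySem.List.pyGetD prices (i + 4) 0))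
          else st)
        (PySem.Set.empty, d)
    res.2) PySem.Dict.empty
  (PySem.List.max? d.values (fun v => v)).getD 0

-- ===== PRECONDITION & SPEC =====
-- Pre_ excludes only the empty list, on which the Python A (and B alike) raises ValueError (max of no values).
def Pre_part2 (secrets : List Int) : Prop := secrets ≠ []
instance (secrets : List Int) : Decidable (Pre_part2 secrets) := by unfold Pre_part2; infer_instance
def pvWitness_part2 : List Int := [1]

def Spec_part2 (secrets : List Int) (out : Int) : Prop := out = part2_alt secrets
instance (secrets : List Int) (out : Int) : Decidable (Spec_part2 secrets out) := by unfold Spec_part2; infer_instance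

-- ===== CLAIM (what is proved, stated in full; the proofs are below) =====
def Claim_equal_part2 : Prop := ∀ (secrets : List Int), Dom_part2 secrets → Pre_part2 secrets → Spec_part2 secrets (part2 secrets)

-- ===== LEMMAS AND PROOFS =====

-- the secret after k generations, its price, and the k-th price difference
def pvSec (s0 : Int) : Nat → Int
  | 0 => s0
  | n + 1 => pvGen (pvSec s0 n)

def pvPr (s0 : Int) (k : Nat) : Int := PySem.Int.mod (pvSec s0 k) 10
def pvDf (s0 : Int) (i : Nat) : Int := pvPr s0 (i + 1) - pvPr s0 i

-- B's window-accumulation step, specialized to Nat indices and symbolic windows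
def pvStepB (s0 : Int) (st : PySem.Set (List Int) × PySem.Dict (List Int) Int) (i : Nat) :
    PySem.Set (List Int) × PySem.Dict (List Int) Int :=
  let w := [pvDf s0 i, pvDf s0 (i + 1), pvDf s0 (i + 2), pvDf s0 (i + 3)]
  if w ∉ st.1 then (PySem.Set.add st.1 w, st.2.modify w 0 (· + pvPr s0 (i + 4))) else st

theorem pvFoldl_ignore_iterate {α β : Type} (f : α → α) (l : List β) (init : α) :
    l.foldl (fun st _ => f st) init = f^[l.length] init := by
  induction l generalizing init with
  | nil => rfl
  | cons x xs ih => simp [List.foldl_cons, ih, Function.iterate_succ_apply]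

theorem pvPrices_iterate (s0 : Int) (m : Nat) :
    (fun (st : Int × List Int) => let s' := pvGen st.1; (s', st.2 ++ [PySem.Int.mod s' 10]))^[m]
      (s0, [PySem.Int.mod s0 10])
    = (pvSec s0 m, (List.range (m + 1)).map (pvPr s0)) := by
  induction m with
  | zero => simp [pvSec, pvPr, List.range_succ]
  | succ m ih => rw [Function.iterate_succ_apply', ih]; simp [List.range_succ, pvSec, pvPr]

theorem pvTake4 {α : Type} (l : List α) (i : Nat) (h : i + 4 ≤ l.length) :
    (l.drop i).take 4 = [l[i]'(by omega), l[i+1]'(by omega), l[i+2]'(by omega), l[i+3]'(by omega)] := by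
  rw [List.drop_eq_getElem_cons (by omega : i < l.length),
      List.drop_eq_getElem_cons (by omega : i+1 < l.length),
      List.drop_eq_getElem_cons (by omega : i+1+1 < l.length),
      List.drop_eq_getElem_cons (by omega : i+1+1+1 < l.length)]
  simp only [List.take_succ_cons, List.take_zero]

theorem pvDrop3 {α : Type} (l : List α) (i : Nat) (h : i + 3 = l.length) :
    l.drop i = [l[i]'(by omega), l[i+1]'(by omega), l[i+2]'(by omega)] := by
  rw [List.drop_eq_getElem_cons (by omega : i < l.length),
      List.drop_eq_getElem_cons (by omega : i+1 < l.length),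
      List.drop_eq_getElem_cons (by omega : i+1+1 < l.length),
      List.drop_eq_nil_of_le (by omega)]

theorem pvMain_inv (s0 : Int) (d0 : PySem.Dict (List Int) Int) (n : Nat) (hn : n ≤ 2000) :
    pvStepA^[n] (s0, ([] : List Int), PySem.Int.mod s0 10, PySem.Set.empty, d0)
    = (pvSec s0 n,
       (((List.range n).map (pvDf s0)).drop (n - 4)),
       pvPr s0 n,
       ((List.range (n - 3)).foldl (pvStepB s0) (PySem.Set.empty, d0)).1,
       ((List.range (n - 3)).foldl (pvStepB s0) (PySem.Set.empty, d0)).2) := by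
  induction n with
  | zero => simp [pvSec, pvPr]
  | succ n ih =>
    rw [Function.iterate_succ_apply', ih (by omega)]
    simp only [pvStepA]
    have e1 : PySem.Int.mod (pvGen (pvSec s0 n)) 10 = pvPr s0 (n+1) := rfl
    rw [e1]
    have e2 : pvPr s0 (n+1) - pvPr s0 n = pvDf s0 n := rfl
    rw [e2]
    have hlen : (List.map (pvDf s0) (List.range n)).length = n := by simp
    have hslice : PySem.List.slice ((List.map (pvDf s0) (List.range n)).drop (n-4)) (some (-3)) none
        = (List.map (pvDf s0) (List.range n)).drop (n-3) := by
      rw [PySem.List.slice_from_neg_ofNat _ 3 (by norm_num), List.length_drop, List.drop_drop]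
      congr 1
      omega
    rw [hslice]
    have hseq : (List.map (pvDf s0) (List.range n)).drop (n-3) ++ [pvDf s0 n]
        = ((List.range (n+1)).map (pvDf s0)).drop (n+1-4) := by
      rw [List.range_succ, List.map_append, show n+1-4 = n-3 from by omega,
          List.drop_append]
      simp [show n-3-n = 0 from by omega]
    rw [hseq]
    by_cases h3 : 3 ≤ n
    · -- a full 4-window: this iteration is B's window step i = n-3
      have hw4 : ((List.range (n+1)).map (pvDf s0)).drop (n+1-4)
          = [pvDf s0 (n-3), pvDf s0 (n-3+1), pvDf s0 (n-3+2), pvDf s0 (n-3+3)] := by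
        rw [← hseq, pvDrop3 (List.map (pvDf s0) (List.range n)) (n-3) (by simp; omega)]
        simp [show n-3+3 = n from by omega]
      rw [hw4, show n+1-3 = (n-3)+1 from by omega, List.range_succ, List.foldl_append,
          List.foldl_cons, List.foldl_nil]
      simp only [pvStepB]
      by_cases hmem : [pvDf s0 (n-3), pvDf s0 (n-3+1), pvDf s0 (n-3+2), pvDf s0 (n-3+3)]
          ∈ (List.foldl (pvStepB s0) (PySem.Set.empty, d0) (List.range (n - 3))).1
      · rw [if_neg (fun h => h.2 hmem), if_neg (not_not_intro hmem)]
        simp [pvSec]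
      · rw [if_pos ⟨by simp, hmem⟩, if_pos hmem]
        simp [pvSec, show n-3+4 = n+1 from by omega]
    · -- fewer than 4 changes so far: A's test fails and B has no window yet
      rw [if_neg]
      · have h0 : n+1-3 = n-3 := by omega
        rw [h0]
        simp [pvSec]
      · rintro ⟨hlen4, -⟩
        rw [List.length_drop] at hlen4
        simp at hlen4
        omega

set_option maxRecDepth 4096 in
theorem pvBuyer_eq (s0 : Int) (d0 : PySem.Dict (List Int) Int) :
    ((PySem.List.pyRange 0 2000 1).foldl (fun st _ => pvStepA st)
      (s0, ([] : List Int), PySem.Int.mod s0 10, PySem.Set.empty, d0)).2.2.2.2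
    = (let ps := (PySem.List.pyRange 0 2000 1).foldl
        (fun (st : Int × List Int) _ => let s' := pvGen st.1; (s', st.2 ++ [PySem.Int.mod s' 10]))
        (s0, [PySem.Int.mod s0 10])
       let prices := ps.2
       let diffs := (PySem.List.pyRange 0 2000 1).map
        (fun i => PySem.List.pyGetD prices (i + 1) 0 - PySem.List.pyGetD prices i 0)
       ((PySem.List.pyRange 0 (PySem.List.len diffs - 3) 1).foldl
        (fun (st : PySem.Set (List Int) × PySem.Dict (List Int) Int) i =>
          let window := PySem.List.slice diffs (some i) (some (i + 4))
          if window ∉ st.1 then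
            (PySem.Set.add st.1 window,
             st.2.modify window 0 (· + PySem.List.pyGetD prices (i + 4) 0))
          else st)
        (PySem.Set.empty, d0)).2) := by
  have hlenR : (PySem.List.pyRange 0 2000 1).length = 2000 := by
    rw [PySem.List.length_pyRange_one]; simp
  -- A's fused loop is 2000 iterations of pvStepA; apply the invariant
  have key : ∀ (P : PySem.Set (List Int) × PySem.Dict (List Int) Int),
      (List.range (2000 - 3)).foldl (pvStepB s0) (PySem.Set.empty, d0) = P →
      (pvStepA^[2000] (s0, ([] : List Int), PySem.Int.mod s0 10, PySem.Set.empty, d0)).2.2.2.2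
        = P.2 := by
    intro P hPe
    rw [pvMain_inv s0 d0 2000 le_rfl, hPe]
  rw [pvFoldl_ignore_iterate pvStepA, hlenR, key _ rfl]
  -- B's price-list loop
  have hps : (PySem.List.pyRange 0 2000 1).foldl
        (fun (st : Int × List Int) _ => let s' := pvGen st.1; (s', st.2 ++ [PySem.Int.mod s' 10]))
        (s0, [PySem.Int.mod s0 10])
      = (pvSec s0 2000, (List.range (2000 + 1)).map (pvPr s0)) := by
    rw [pvFoldl_ignore_iterate
          (fun (st : Int × List Int) => let s' := pvGen st.1; (s', st.2 ++ [PySem.Int.mod s' 10])),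
        hlenR]
    exact pvPrices_iterate s0 2000
  rw [hps]
  change _ = (List.foldl
      (fun (st : PySem.Set (List Int) × PySem.Dict (List Int) Int) i =>
        if PySem.List.slice
            (List.map (fun i =>
              PySem.List.pyGetD (List.map (pvPr s0) (List.range (2000 + 1))) (i + 1) 0 -
              PySem.List.pyGetD (List.map (pvPr s0) (List.range (2000 + 1))) i 0)
              (PySem.List.pyRange 0 2000 1)) (some i) (some (i + 4)) ∉ st.1 then
          (st.1.add (PySem.List.slice
            (List.map (fun i =>
              PySem.List.pyGetD (List.map (pvPr s0) (List.range (2000 + 1))) (i + 1) 0 -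
              PySem.List.pyGetD (List.map (pvPr s0) (List.range (2000 + 1))) i 0)
              (PySem.List.pyRange 0 2000 1)) (some i) (some (i + 4))),
           st.2.modify (PySem.List.slice
            (List.map (fun i =>
              PySem.List.pyGetD (List.map (pvPr s0) (List.range (2000 + 1))) (i + 1) 0 -
              PySem.List.pyGetD (List.map (pvPr s0) (List.range (2000 + 1))) i 0)
              (PySem.List.pyRange 0 2000 1)) (some i) (some (i + 4)))
            0 (· + PySem.List.pyGetD (List.map (pvPr s0) (List.range (2000 + 1))) (i + 4) 0))
        else st)
      (PySem.Set.empty, d0)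
      (PySem.List.pyRange 0
        (PySem.List.len (List.map (fun i =>
              PySem.List.pyGetD (List.map (pvPr s0) (List.range (2000 + 1))) (i + 1) 0 -
              PySem.List.pyGetD (List.map (pvPr s0) (List.range (2000 + 1))) i 0)
              (PySem.List.pyRange 0 2000 1)) - 3) 1)).2
  have hP : ∀ (k : Nat), k < 2001 →
      PySem.List.pyGetD (List.map (pvPr s0) (List.range (2000 + 1))) ((k : Int)) 0 = pvPr s0 k := by
    intro k hk
    rw [PySem.List.pyGetD_natCast, List.getD_eq_getElem _ _ (by simpa using hk)]
    simp
  have hdiffs : List.map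
      (fun i => PySem.List.pyGetD (List.map (pvPr s0) (List.range (2000 + 1))) (i + 1) 0 -
        PySem.List.pyGetD (List.map (pvPr s0) (List.range (2000 + 1))) i 0)
      (PySem.List.pyRange 0 2000 1) = (List.range 2000).map (pvDf s0) := by
    rw [PySem.List.pyRange_one]
    simp only [List.map_map]
    refine List.map_congr_left ?_
    intro k hk
    have hk' : k < (((2000 : Int) - 0).toNat) := by simpa using hk
    simp only [Function.comp]
    rw [show ((0 : Int) + (k : Int)) = ((k : Int)) from by ring,
        show ((k : Int) + 1) = (((k + 1 : Nat) : Int)) from by push_cast; ring,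
        hP k (by omega), hP (k + 1) (by omega)]
    rfl
  rw [hdiffs]
  have hlen2 : PySem.List.len ((List.range 2000).map (pvDf s0)) - 3 = (1997 : Int) := by
    simp [PySem.List.len_eq]
  rw [hlen2]
  have hr : PySem.List.pyRange 0 1997 1 = (List.range 1997).map (fun (k : Nat) => (k : Int)) := by
    exact_mod_cast PySem.List.pyRange_zero_nat 1997
  rw [hr]
  rw [List.foldl_map]
  rw [show (2000 - 3 : Nat) = 1997 from by norm_num]
  apply congrArg Prod.snd
  apply PySem.List.foldl_congr_mem
  intro st k hk
  have hk' : k < 1997 := List.mem_range.mp hk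
  have hwin : PySem.List.slice ((List.range 2000).map (pvDf s0)) (some (k : Int))
      (some ((k : Int) + 4)) = [pvDf s0 k, pvDf s0 (k+1), pvDf s0 (k+2), pvDf s0 (k+3)] := by
    rw [show ((k : Int) + 4) = (((k + 4 : Nat)) : Int) from by push_cast; ring,
        PySem.List.slice_natCast, show k + 4 - k = 4 from by omega,
        pvTake4 _ k (by simp; omega)]
    simp
  have hpr : PySem.List.pyGetD (List.map (pvPr s0) (List.range (2000 + 1))) ((k : Int) + 4) 0
      = pvPr s0 (k + 4) := by
    rw [show ((k : Int) + 4) = (((k + 4 : Nat)) : Int) from by push_cast; ring,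
        hP (k + 4) (by omega)]
  simp only [pvStepB]
  rw [hwin, hpr]

-- ===== VERDICT (by name: the statement is the Claim_ definition above) =====
theorem part2_spec : Claim_equal_part2 := by
  intro secrets _ _
  show part2 secrets = part2_alt secrets
  unfold part2 part2_alt
  simp only
  exact congrArg (fun d => (PySem.List.max? (PySem.Dict.values d) (fun v => v)).getD 0)
    (PySem.List.foldl_congr_mem _ _ _ _ (fun d s _ => pvBuyer_eq s d))
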